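-- pv_equiv track=rewrite | github.com/stefanoKS/aikensa_agc | aikensa/thread/inspection_thread.py | convert_lotASCII_to_chars
-- ===== SOURCE A (Python) =====
-- def convert_lotASCII_to_chars(ascii_words, stop_at_null=True) -> str:
--     """
--     Convert list of 16-bit words (each contains 2 ASCII bytes) into a string.
--
--     Example word: 21321 = 0x5349 -> bytes [0x49, 0x53] (little-endian) -> 'IS'
--     """
--     out_bytes = bytearray()
--
--     for w in ascii_words:
--         if w is None:
--             continue
--
--         w = int(w) & 0xFFFF  # ensure 16-bit
--
--         # Most PLCs store as little-endian within the 16-bit word: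
--         # low byte first, then high byte.
--         b0 = w & 0xFF
--         b1 = (w >> 8) & 0xFF
--
--         for b in (b0, b1):
--             if b == 0:
--                 if stop_at_null:
--                     return out_bytes.decode("ascii", errors="ignore")
--                 continue
--             out_bytes.append(b)
--
--     return out_bytes.decode("ascii", errors="ignore")
-- ===== SOURCE B (Python) =====
-- def convert_lotASCII_to_chars(ascii_words, stop_at_null=True) -> str:
--     # Phase 1: flatten all words into the full little-endian byte list.
--     data = []
--     for w in ascii_words:
--         if w is None:
--             continue
--         v = int(w) & 0xFFFF
--         data.append(v & 0xFF)
--         data.append(v >> 8)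
--     # Phase 2: null handling.
--     if stop_at_null:
--         if 0 in data:
--             data = data[:data.index(0)]
--     else:
--         data = [b for b in data if b != 0]
--     return bytes(data).decode("ascii", errors="ignore")
-- ===== Notes on version B (the rewrite author's own statement) =====
-- stated objective: alternative
-- what changed: B separates the work into two passes: first flatten all words into the complete byte list, then truncate at the first null (or filter out nulls), instead of A's single interleaved loop with an early return from inside the inner byte loop.
import Mathlib
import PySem

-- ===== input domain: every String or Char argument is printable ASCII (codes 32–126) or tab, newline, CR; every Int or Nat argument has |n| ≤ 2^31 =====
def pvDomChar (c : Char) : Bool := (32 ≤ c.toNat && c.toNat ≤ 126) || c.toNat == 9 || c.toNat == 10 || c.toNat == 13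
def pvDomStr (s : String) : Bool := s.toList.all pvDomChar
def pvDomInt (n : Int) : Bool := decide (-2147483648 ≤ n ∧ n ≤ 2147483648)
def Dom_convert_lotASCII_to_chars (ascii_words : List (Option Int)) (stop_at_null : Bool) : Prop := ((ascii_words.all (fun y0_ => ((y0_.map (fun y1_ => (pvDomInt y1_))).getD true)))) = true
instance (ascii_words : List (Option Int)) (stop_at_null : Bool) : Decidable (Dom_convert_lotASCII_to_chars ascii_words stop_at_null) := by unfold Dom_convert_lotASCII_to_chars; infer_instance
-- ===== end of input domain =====

-- B builds the full byte list first and then truncates at the first null / filters nulls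
-- in a second pass, instead of A's single interleaved loop with an early return (alternative decomposition).

-- ===== PORT A =====
-- bytes.decode("ascii", errors="ignore"): bytes ≥ 128 are dropped, the rest become chars.
def pvDecodeAsciiIgnore (bs : List Nat) : String :=
  String.mk ((bs.filter (fun b => b < 128)).map (fun b => Char.ofNat b))

-- the loop of A: early `return` is modelled by returning the decoded string directly;
-- the inner `for b in (b0, b1)` is unrolled into its two iterations.
def pvGoA (ws : List (Option Int)) (stop_at_null : Bool) (out_bytes : List Nat) : String :=
  match ws with
  | [] => pvDecodeAsciiIgnore out_bytes
  | none :: rest => pvGoA rest stop_at_null out_bytes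
  | some w :: rest =>
    let v : Nat := (PySem.Int.mod w 65536).toNat   -- int(w) & 0xFFFF (floor mod, positive divisor)
    let b0 := v % 256                              -- w & 0xFF
    let b1 := (v / 256) % 256                      -- (w >> 8) & 0xFF
    if b0 = 0 then
      if stop_at_null then pvDecodeAsciiIgnore out_bytes
      else -- continue: second iteration with b1
        if b1 = 0 then pvGoA rest stop_at_null out_bytes
        else pvGoA rest stop_at_null (out_bytes ++ [b1])
    else
      if b1 = 0 then
        if stop_at_null then pvDecodeAsciiIgnore (out_bytes ++ [b0])
        else pvGoA rest stop_at_null (out_bytes ++ [b0])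
      else pvGoA rest stop_at_null (out_bytes ++ [b0, b1])

def convert_lotASCII_to_chars (ascii_words : List (Option Int)) (stop_at_null : Bool) : String :=
  pvGoA ascii_words stop_at_null []

-- ===== PORT B =====
-- phase 1 of Source B: flatten every non-None word into two little-endian bytes.
def pvFlatten (ws : List (Option Int)) : List Nat :=
  ws.foldl (fun data ow =>
    match ow with
    | none => data
    | some w =>
      let v : Nat := (PySem.Int.mod w 65536).toNat   -- int(w) & 0xFFFF
      data ++ [v % 256, v / 256]                      -- v & 0xFF, v >> 8
    ) []

def convert_lotASCII_to_chars_alt (ascii_words : List (Option Int)) (stop_at_null : Bool) : String :=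
  let data := pvFlatten ascii_words
  let data2 :=
    if stop_at_null then
      if data.contains 0 then
        data.take ((PySem.List.index? data 0).getD 0)   -- data[:data.index(0)]
      else data
    else data.filter (fun b => b ≠ 0)
  pvDecodeAsciiIgnore data2

-- ===== PRECONDITION & SPEC =====
def Spec_convert_lotASCII_to_chars (ascii_words : List (Option Int)) (stop_at_null : Bool) (out : String) : Prop := out = convert_lotASCII_to_chars_alt ascii_words stop_at_null
instance (ascii_words : List (Option Int)) (stop_at_null : Bool) (out : String) : Decidable (Spec_convert_lotASCII_to_chars ascii_words stop_at_null out) := by unfold Spec_convert_lotASCII_to_chars; infer_instance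

-- ===== CLAIM (what is proved, stated in full; the proofs are below) =====
def Claim_equal_convert_lotASCII_to_chars : Prop := ∀ (ascii_words : List (Option Int)) (stop_at_null : Bool), Dom_convert_lotASCII_to_chars ascii_words stop_at_null → Spec_convert_lotASCII_to_chars ascii_words stop_at_null (convert_lotASCII_to_chars ascii_words stop_at_null)

-- ===== LEMMAS AND PROOFS =====

-- the flattened bytes of a cons
theorem pvFlatten_acc (ws : List (Option Int)) (acc : List Nat) :
    ws.foldl (fun data ow =>
      match ow with
      | none => data
      | some w =>
        let v : Nat := (PySem.Int.mod w 65536).toNat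
        data ++ [v % 256, v / 256]) acc
    = acc ++ pvFlatten ws := by
  induction ws generalizing acc with
  | nil => simp [pvFlatten]
  | cons ow rest ih =>
    cases ow with
    | none => simpa [pvFlatten, List.foldl_cons] using ih acc
    | some w =>
      simp only [pvFlatten, List.foldl_cons]
      rw [ih, ih ([] ++ _)]
      simp

theorem pvFlatten_cons_some (w : Int) (rest : List (Option Int)) :
    pvFlatten (some w :: rest)
      = ((PySem.Int.mod w 65536).toNat % 256) :: ((PySem.Int.mod w 65536).toNat / 256) :: pvFlatten rest := by
  simp only [pvFlatten, List.foldl_cons]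
  rw [pvFlatten_acc]
  simp [pvFlatten]

theorem pvFlatten_cons_none (rest : List (Option Int)) :
    pvFlatten (none :: rest) = pvFlatten rest := rfl

-- word bytes are < 256, so A's extra % 256 on the high byte is the identity
theorem pv_hi_lt (w : Int) : (PySem.Int.mod w 65536).toNat / 256 < 256 := by
  have h : PySem.Int.mod w 65536 = w % 65536 :=
    PySem.Int.mod_eq_emod_of_pos (by norm_num)
  have h2 : w % 65536 < 65536 := Int.emod_lt_of_pos _ (by norm_num)
  have h3 : (PySem.Int.mod w 65536).toNat < 65536 := by
    rw [h]; omega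
  omega

theorem pv_hi_mod (w : Int) :
    (PySem.Int.mod w 65536).toNat / 256 % 256 = (PySem.Int.mod w 65536).toNat / 256 :=
  Nat.mod_eq_of_lt (pv_hi_lt w)

-- A with stop_at_null = false computes the null-filtered flatten
theorem pvGoA_false (ws : List (Option Int)) (acc : List Nat) :
    pvGoA ws false acc = pvDecodeAsciiIgnore (acc ++ (pvFlatten ws).filter (fun b => b ≠ 0)) := by
  induction ws generalizing acc with
  | nil => simp [pvGoA, pvFlatten]
  | cons ow rest ih =>
    cases ow with
    | none => rw [pvFlatten_cons_none]; exact ih acc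
    | some w =>
      rw [pvFlatten_cons_some]
      simp only [pvGoA, pv_hi_mod]
      set v := (PySem.Int.mod w 65536).toNat with hv
      by_cases h0 : v % 256 = 0 <;> by_cases h1 : v / 256 = 0 <;>
        simp [h0, h1, ih, List.append_assoc]

-- A with stop_at_null = true computes takeWhile (≠ 0) of the flatten
theorem pvGoA_true (ws : List (Option Int)) (acc : List Nat) :
    pvGoA ws true acc = pvDecodeAsciiIgnore (acc ++ (pvFlatten ws).takeWhile (fun b => b ≠ 0)) := by
  induction ws generalizing acc with
  | nil => simp [pvGoA, pvFlatten]
  | cons ow rest ih =>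
    cases ow with
    | none => rw [pvFlatten_cons_none]; exact ih acc
    | some w =>
      rw [pvFlatten_cons_some]
      simp only [pvGoA, pv_hi_mod]
      set v := (PySem.Int.mod w 65536).toNat with hv
      by_cases h0 : v % 256 = 0 <;> by_cases h1 : v / 256 = 0 <;>
        simp [h0, h1, ih, List.takeWhile_cons, List.append_assoc]

-- B's slice-at-first-null equals takeWhile (≠ 0)
theorem pv_take_index_eq_takeWhile (l : List Nat) :
    (if l.contains 0 then l.take ((PySem.List.index? l 0).getD 0) else l)
      = l.takeWhile (fun b => b ≠ 0) := by
  induction l with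
  | nil => simp
  | cons x xs ih =>
    by_cases hx : x = 0
    · subst hx
      simp [PySem.List.index?_eq_idxOf?, List.idxOf?_cons, List.takeWhile_cons]
    · by_cases hm : xs.contains 0
      · have hcont : (x :: xs).contains 0 = true := by
          simp only [List.contains_cons, Bool.or_eq_true]
          right; exact hm
        have hs : (List.idxOf? 0 xs).isSome := by
          rw [List.isSome_idxOf?]; simpa using hm
        obtain ⟨k, hk⟩ := Option.isSome_iff_exists.mp hs
        have ih' := ih
        rw [if_pos hm] at ih'
        simp only [PySem.List.index?_eq_idxOf?, hk, Option.getD_some] at ih'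
        have hidx : List.idxOf? 0 (x :: xs) = some (k + 1) := by
          simp [List.idxOf?_cons, hx, hk]
        rw [if_pos hcont, PySem.List.index?_eq_idxOf?, hidx]
        simp [List.takeWhile_cons, hx, ih']
      · have hcont : ¬ ((x :: xs).contains 0 = true) := by
          simp only [List.contains_cons, Bool.or_eq_true, beq_iff_eq, not_or]
          exact ⟨fun h => hx h.symm, by simpa using hm⟩
        have ih' := ih
        rw [if_neg (by simpa using hm)] at ih'
        rw [if_neg hcont]
        simp [List.takeWhile_cons, hx]
        simpa using ih'

-- ===== VERDICT (by name: the statement is the Claim_ definition above) =====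
theorem convert_lotASCII_to_chars_spec : Claim_equal_convert_lotASCII_to_chars := by
  unfold Claim_equal_convert_lotASCII_to_chars
  intro ws stop _
  unfold Spec_convert_lotASCII_to_chars convert_lotASCII_to_chars convert_lotASCII_to_chars_alt
  cases stop with
  | false =>
    rw [pvGoA_false]
    simp
  | true =>
    rw [pvGoA_true, ← pv_take_index_eq_takeWhile (pvFlatten ws)]
    simp
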